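-- pv_equiv track=rewrite | github.com/JuBiotech/robotools | robotools/worklists/utils.py | non_repetitive_argsort
-- ===== SOURCE A (Python) =====
-- import collections
-- from typing import Dict, Iterable, List, Literal, Optional, Sequence, Tuple, Union
--
-- def non_repetitive_argsort(wells: Sequence[str]) -> list[int]:
--     """Argsort without repeating items with the same first letter."""
--     # Group wells by row
--     by_row = collections.defaultdict(list)
--     for iw, w in enumerate(wells):
--         by_row[w[0]].append((iw, w))
--     by_row_sorted = {r: by_row[r] for r in sorted(by_row)}
--
--     # Collect the original index of the first entry
--     # from each row, until all rows are empty.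
--     results = []
--     while by_row_sorted:
--         for r in list(by_row_sorted):
--             row = by_row_sorted[r]
--             iw, w = row.pop(0)
--             results.append(iw)
--             if not row:
--                 by_row_sorted.pop(r)
--     return results
-- ===== SOURCE B (Python) =====
-- def non_repetitive_argsort(wells):
--     """Argsort without repeating items with the same first letter."""
--     # Group the original indices by row (first letter), in sorted row order,
--     # then read the groups column by column: no popping, no dict mutation.
--     groups = {}
--     for i, w in enumerate(wells):
--         groups.setdefault(w[0], []).append(i)
--     rows = [groups[r] for r in sorted(groups)]
--     width = max((len(row) for row in rows), default=0)
--     out = []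
--     for k in range(width):
--         for row in rows:
--             if k < len(row):
--                 out.append(row[k])
--     return out
-- ===== Notes on version B (the rewrite author's own statement) =====
-- stated objective: faster
-- what changed: B groups the indices by first letter once and reads the groups column by column with direct indexing, instead of A's while-loop that repeatedly pops the front of each row list and rebuilds/erases dict entries.
import Mathlib
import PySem

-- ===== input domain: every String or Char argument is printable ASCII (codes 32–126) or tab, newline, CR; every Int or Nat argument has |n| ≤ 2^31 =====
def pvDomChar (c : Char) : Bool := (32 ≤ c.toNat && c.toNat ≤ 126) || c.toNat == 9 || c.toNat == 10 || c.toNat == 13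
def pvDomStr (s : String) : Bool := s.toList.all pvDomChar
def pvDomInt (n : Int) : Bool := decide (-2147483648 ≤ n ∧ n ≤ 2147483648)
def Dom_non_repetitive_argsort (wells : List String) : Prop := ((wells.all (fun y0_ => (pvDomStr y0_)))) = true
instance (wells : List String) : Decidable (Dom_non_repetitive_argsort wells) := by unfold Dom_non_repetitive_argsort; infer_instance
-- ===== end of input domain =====

-- B replaces A's repeated pop(0)/dict-rebuild round-robin by a single column-wise
-- read of the grouped index lists (objective: faster; both group by first letter,
-- B then indexes columns instead of destructively popping rows).

-- ===== PORT A =====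
-- one step of A's inner `for r in list(by_row_sorted)` loop
def nraStep (st : PySem.Dict Char (List (Int × String)) × List Int) (r : Char) :
    PySem.Dict Char (List (Int × String)) × List Int :=
  match st.1.get? r with
  | none => st          -- Python would raise KeyError; unreachable (r comes from the keys snapshot)
  | some row =>
    match PySem.List.pop? row 0 with
    | none => st        -- Python would raise IndexError; unreachable (rows in the dict are never empty)
    | some (p, rest) =>
      if rest.isEmpty then (st.1.erase r, st.2 ++ [p.1])
      else (st.1.insert r rest, st.2 ++ [p.1])

-- one iteration of A's `while by_row_sorted:` loop (iterates over a snapshot of the keys)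
def nraPass (d : PySem.Dict Char (List (Int × String))) (results : List Int) :
    PySem.Dict Char (List (Int × String)) × List Int :=
  d.keys.foldl nraStep (d, results)

-- A's while loop; fuel only makes the recursion structural (wells.length + 1 always suffices)
def nraLoop : Nat → PySem.Dict Char (List (Int × String)) → List Int → List Int
  | 0, _, results => results
  | fuel + 1, d, results =>
    if d.items.isEmpty then results
    else
      let st := nraPass d results
      nraLoop fuel st.1 st.2

def non_repetitive_argsort (wells : List String) : List Int :=
  let by_row := (PySem.List.enumerate wells).foldl
    (fun d p =>
      match PySem.Str.pyGet? p.2 0 with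
      | none => d     -- Python raises IndexError on w[0]; excluded by Pre_
      | some c => d.modify c [] (fun row => row ++ [p]))
    PySem.Dict.empty
  let by_row_sorted := (PySem.List.sorted by_row.keys (fun r => r)).foldl
    (fun acc r => acc.insert r (by_row.getD r [])) PySem.Dict.empty
  nraLoop (wells.length + 1) by_row_sorted []

-- ===== PORT B =====
def non_repetitive_argsort_alt (wells : List String) : List Int :=
  let groups := (PySem.List.enumerate wells).foldl
    (fun g p =>
      match PySem.Str.pyGet? p.2 0 with
      | none => g     -- Python raises IndexError on w[0]; excluded by Pre_
      | some c => g.modify c [] (fun row => row ++ [p.1]))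
    PySem.Dict.empty
  let rows := (PySem.List.sorted groups.keys (fun r => r)).map (fun r => groups.getD r [])
  let width := rows.foldl (fun m row => max m row.length) 0
  (List.range width).foldl
    (fun out k =>
      rows.foldl
        (fun out row =>
          match row[k]? with   -- `if k < len(row): out.append(row[k])` (0 ≤ k, so row[k] is row[k]?)
          | some x => out ++ [x]
          | none => out)
        out)
    []

-- ===== PRECONDITION & SPEC =====
-- A raises IndexError on w[0] for an empty well string; B raises there too, so those inputs are excluded.
def Pre_non_repetitive_argsort (wells : List String) : Prop := "" ∉ wells
instance (wells : List String) : Decidable (Pre_non_repetitive_argsort wells) := by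
  unfold Pre_non_repetitive_argsort; infer_instance

def pvWitness_non_repetitive_argsort : List String := ["A1", "B1", "A2", "A3", "C1", "B2"]

def Spec_non_repetitive_argsort (wells : List String) (out : List Int) : Prop := out = non_repetitive_argsort_alt wells
instance (wells : List String) (out : List Int) : Decidable (Spec_non_repetitive_argsort wells out) := by unfold Spec_non_repetitive_argsort; infer_instance

-- ===== CLAIM (what is proved, stated in full; the proofs are below) =====
def Claim_equal_non_repetitive_argsort : Prop := ∀ (wells : List String), Dom_non_repetitive_argsort wells → Pre_non_repetitive_argsort wells → Spec_non_repetitive_argsort wells (non_repetitive_argsort wells)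

-- ===== LEMMAS AND PROOFS =====

-- first letter of a (nonempty) well
def nraHd (w : String) : Char := w.toList.headD ' '

-- the rows of Int indices held by a dict-state with items L
def nraRows (L : List (Char × List (Int × String))) : List (List Int) :=
  L.map (fun e => e.2.map (fun q => q.1))

-- the dict items after one pass of A's while loop
def nraPassD (L : List (Char × List (Int × String))) : List (Char × List (Int × String)) :=
  (L.map (fun e => (e.1, e.2.tail))).filter (fun e => !e.2.isEmpty)

-- the indices appended during one pass
def nraHeads (L : List (Char × List (Int × String))) : List Int :=
  L.filterMap (fun e => e.2.head?.map (fun q => q.1))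

-- column-interleave of rows, fuel-bounded
def nraItl : Nat → List (List Int) → List Int
  | 0, _ => []
  | f + 1, rows =>
    rows.filterMap (fun r => r.head?) ++
      nraItl f ((rows.map List.tail).filter (fun r => !r.isEmpty))

def nraSup (rows : List (List Int)) : Nat := rows.foldl (fun m row => max m row.length) 0

theorem nraHd_get (s : String) (h : s ≠ "") : PySem.Str.pyGet? s 0 = some (nraHd s) := by
  have h0 : (0 : Int) = ((0 : Nat) : Int) := rfl
  rw [h0, PySem.Str.pyGet?_natCast]
  have : s.toList ≠ [] := by simpa [String.toList_eq_nil_iff] using h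
  cases hs : s.toList with
  | nil => exact absurd hs this
  | cons a t => simp [nraHd, hs]

theorem nraEnum_mem {α : Type} (xs : List α) (s : Int) (p : Int × α)
    (h : p ∈ PySem.List.enumerate xs s) : p.2 ∈ xs := by
  induction xs generalizing s with
  | nil => simp [PySem.List.enumerate] at h
  | cons x t ih =>
    simp only [PySem.List.enumerate, List.mem_cons] at h
    rcases h with h | h
    · subst h; simp
    · exact List.mem_cons_of_mem _ (ih (s + 1) h)

theorem nraEnum_len {α : Type} (xs : List α) (s : Int) :
    (PySem.List.enumerate xs s).length = xs.length := by
  induction xs generalizing s with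
  | nil => rfl
  | cons x t ih => simp [PySem.List.enumerate, ih]

-- a pass-step for a key not at the dict's head leaves the head entry alone
theorem nraStep_cons (e : Char × List (Int × String)) (d : List (Char × List (Int × String)))
    (acc : List Int) (r : Char) (hne : e.1 ≠ r) :
    nraStep (PySem.Dict.mk (e :: d), acc) r =
      (PySem.Dict.mk (e :: (nraStep (PySem.Dict.mk d, acc) r).1.items),
        (nraStep (PySem.Dict.mk d, acc) r).2) := by
  have hbe : (e.1 == r) = false := by simp [hne]
  simp only [nraStep, PySem.Dict.get?, List.find?_cons, hbe]
  cases hg : List.find? (fun p => p.1 == r) d with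
  | none => simp
  | some q =>
    simp only [Option.map_some]
    cases hp : PySem.List.pop? q.2 0 with
    | none => simp
    | some pr =>
      by_cases hrest : pr.2.isEmpty
      · simp [hrest, PySem.Dict.erase, hbe]
      · by_cases hc : (d.any fun p => p.1 == r) = true
        · simp [hrest, PySem.Dict.insert, PySem.Dict.contains, hbe, hc, hne]
        · simp [hrest, PySem.Dict.insert, PySem.Dict.contains, hbe, hc]

theorem nraFold_cons (ks : List Char) (e : Char × List (Int × String))
    (d : List (Char × List (Int × String))) (acc : List Int) (h : e.1 ∉ ks) :
    ks.foldl nraStep (PySem.Dict.mk (e :: d), acc) =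
      ((PySem.Dict.mk (e :: (ks.foldl nraStep (PySem.Dict.mk d, acc)).1.items)),
        (ks.foldl nraStep (PySem.Dict.mk d, acc)).2) := by
  induction ks generalizing d acc with
  | nil => simp
  | cons r ks ih =>
    have hne : e.1 ≠ r := by simp at h; exact h.1
    have hmem : e.1 ∉ ks := by simp at h; exact h.2
    simp only [List.foldl_cons, nraStep_cons e d acc r hne]
    have := ih (nraStep (PySem.Dict.mk d, acc) r).1.items (nraStep (PySem.Dict.mk d, acc) r).2 hmem
    simpa using this

theorem nraPass_eq (L : List (Char × List (Int × String))) (acc : List Int)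
    (hnd : (L.map (fun e => e.1)).Nodup) (hne : ∀ e ∈ L, e.2 ≠ []) :
    nraPass (PySem.Dict.mk L) acc = (PySem.Dict.mk (nraPassD L), acc ++ nraHeads L) := by
  induction L generalizing acc with
  | nil => simp [nraPass, nraPassD, nraHeads, PySem.Dict.keys]
  | cons e rest ih =>
    obtain ⟨r, row⟩ := e
    have hrow : row ≠ [] := hne (r, row) (List.mem_cons_self)
    obtain ⟨h, t, rfl⟩ : ∃ h t, row = h :: t := by
      cases row with
      | nil => exact absurd rfl hrow
      | cons a b => exact ⟨a, b, rfl⟩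
    have hnd' : (rest.map (fun e => e.1)).Nodup := by simp at hnd; exact hnd.2
    have hr_not : r ∉ rest.map (fun e => e.1) := by simp at hnd; simpa using hnd.1
    have hne' : ∀ e ∈ rest, e.2 ≠ [] := fun e he => hne e (List.mem_cons_of_mem _ he)
    -- keys snapshot
    have hkeys : (PySem.Dict.mk ((r, h :: t) :: rest)).keys = r :: rest.map (fun e => e.1) := by
      simp [PySem.Dict.keys]
    -- the first step pops h from row r
    have hpop : PySem.List.pop? (h :: t) 0 = some (h, t) := by
      simp [PySem.List.pop?, PySem.List.pyIdx?]
    have hstep : nraStep (PySem.Dict.mk ((r, h :: t) :: rest), acc) r =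
        (if t.isEmpty then (PySem.Dict.mk rest, acc ++ [h.1])
         else (PySem.Dict.mk ((r, t) :: rest), acc ++ [h.1])) := by
      have hfind : List.find? (fun p => p.1 == r) ((r, h :: t) :: rest) = some (r, h :: t) := by
        simp
      by_cases ht : t.isEmpty
      · have hres : rest.filter (fun p => !(p.1 == r)) = rest := by
          apply List.filter_eq_self.mpr
          intro p hp
          have : p.1 ≠ r := by
            intro hcon
            exact hr_not (hcon ▸ List.mem_map_of_mem hp)
          simp [this]
        simp [nraStep, PySem.Dict.get?, hfind, hpop, ht, PySem.Dict.erase, hres]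
      · have hcont : (PySem.Dict.mk ((r, h :: t) :: rest)).contains r = true := by
          simp [PySem.Dict.contains]
        have hrepl : rest.map (fun p => if p.1 = r then (r, t) else p) = rest := by
          conv_rhs => rw [← List.map_id rest]
          apply List.map_congr_left
          intro p hp
          have : p.1 ≠ r := by
            intro hcon
            exact hr_not (hcon ▸ List.mem_map_of_mem hp)
          simp [this]
        simp [nraStep, PySem.Dict.get?, hfind, hpop, ht, PySem.Dict.insert, hcont, hrepl]
    by_cases ht : t.isEmpty
    · have ht' : t = [] := by simpa [List.isEmpty_iff] using ht
      subst ht'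
      have : nraPass (PySem.Dict.mk ((r, [h]) :: rest)) acc =
          (rest.map (fun e => e.1)).foldl nraStep (PySem.Dict.mk rest, acc ++ [h.1]) := by
        simp only [nraPass, hkeys, List.foldl_cons, hstep]
        simp
      rw [this]
      have hrest := ih (acc ++ [h.1]) hnd' hne'
      simp only [nraPass, PySem.Dict.keys] at hrest
      rw [hrest]
      simp [nraPassD, nraHeads]
    · have : nraPass (PySem.Dict.mk ((r, h :: t) :: rest)) acc =
          (rest.map (fun e => e.1)).foldl nraStep (PySem.Dict.mk ((r, t) :: rest), acc ++ [h.1]) := by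
        simp only [nraPass, hkeys, List.foldl_cons, hstep]
        simp [ht]
      rw [this, nraFold_cons _ _ _ _ hr_not]
      have hrest := ih (acc ++ [h.1]) hnd' hne'
      simp only [nraPass, PySem.Dict.keys] at hrest
      rw [hrest]
      have ht' : ¬ t = [] := by simpa [List.isEmpty_iff] using ht
      simp [nraPassD, nraHeads, ht']

theorem nraRows_passD (L : List (Char × List (Int × String))) :
    nraRows (nraPassD L) = ((nraRows L).map List.tail).filter (fun r => !r.isEmpty) := by
  simp only [nraRows, nraPassD, List.filter_map, List.map_map, Function.comp_def]
  have hfun : ∀ e : Char × List (Int × String),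
      e.2.tail.map (fun q => q.1) = (e.2.map (fun q => q.1)).tail := by
    intro e; cases e.2 <;> simp
  have hpred : ∀ e : Char × List (Int × String),
      (!e.2.tail.isEmpty) = (!(e.2.map (fun q => q.1)).tail.isEmpty) := by
    intro e; cases e.2 <;> simp
  rw [List.filter_congr (fun e _ => hpred e)]
  exact List.map_congr_left (fun e _ => hfun e)

theorem nraHeads_eq (L : List (Char × List (Int × String))) :
    nraHeads L = (nraRows L).filterMap (fun r => r.head?) := by
  induction L with
  | nil => rfl
  | cons e rest ih =>
    cases h : e.2 with
    | nil => simpa [nraHeads, nraRows, h] using ih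
    | cons a b => simpa [nraHeads, nraRows, h] using ih

theorem nraSup_le (rows : List (List Int)) (m : Nat) (h : ∀ r ∈ rows, r.length ≤ m) :
    nraSup rows ≤ m := by
  unfold nraSup
  suffices H : ∀ init, init ≤ m → rows.foldl (fun m row => max m row.length) init ≤ m by
    exact H 0 (Nat.zero_le m)
  induction rows with
  | nil => intro init hi; simpa using hi
  | cons r rest ih =>
    intro init hi
    simp only [List.foldl_cons]
    exact ih (fun q hq => h q (List.mem_cons_of_mem _ hq)) _
      (max_le hi (h r (List.mem_cons_self)))

theorem nraLe_sup (rows : List (List Int)) (r : List Int) (h : r ∈ rows) :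
    r.length ≤ nraSup rows :=
  (PySem.List.le_foldl_max_nat rows (fun r => r.length) 0).2 r h

theorem nraItl_nil (f : Nat) : nraItl f [] = [] := by
  induction f with
  | zero => rfl
  | succ n ih => simp [nraItl, ih]

theorem nraItl_all_nil (f : Nat) (rows : List (List Int)) (h : ∀ r ∈ rows, r = []) :
    nraItl f rows = [] := by
  cases f with
  | zero => rfl
  | succ g =>
    have h1 : rows.filterMap (fun r => r.head?) = [] := by
      simp only [List.filterMap_eq_nil_iff]
      intro r hr; rw [h r hr]; rfl
    have h2 : (rows.map List.tail).filter (fun r => !r.isEmpty) = [] := by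
      simp only [List.filter_eq_nil_iff]
      intro r hr
      obtain ⟨q, hq, rfl⟩ := List.mem_map.mp hr
      rw [h q hq]
      simp
    simp [nraItl, h1, h2, nraItl_nil]

theorem nraSup_tail (rows : List (List Int)) (r : List Int)
    (h : r ∈ (rows.map List.tail).filter (fun r => !r.isEmpty)) :
    r.length + 1 ≤ nraSup rows := by
  obtain ⟨hm, hne⟩ := List.mem_filter.mp h
  obtain ⟨q, hq, rfl⟩ := List.mem_map.mp hm
  have hle := nraLe_sup rows q hq
  have hlt : q.tail.length + 1 ≤ q.length := by
    cases q with
    | nil => exact absurd hne (by simp)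
    | cons a b => simp
  omega

theorem nraItl_stable (f g : Nat) (rows : List (List Int))
    (hf : nraSup rows ≤ f) (hg : nraSup rows ≤ g) : nraItl f rows = nraItl g rows := by
  induction f generalizing g rows with
  | zero =>
    have hall : ∀ r ∈ rows, r = [] := by
      intro r hr
      have hlen := nraLe_sup rows r hr
      cases r with
      | nil => rfl
      | cons a b => simp at hlen; omega
    rw [nraItl_all_nil 0 rows hall, nraItl_all_nil g rows hall]
  | succ f ih =>
    cases g with
    | zero =>
      have hall : ∀ r ∈ rows, r = [] := by
        intro r hr
        have hlen := nraLe_sup rows r hr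
        cases r with
        | nil => rfl
        | cons a b => simp at hlen; omega
      rw [nraItl_all_nil _ _ hall, nraItl_all_nil _ _ hall]
    | succ g =>
      simp only [nraItl]
      congr 1
      apply ih
      · apply nraSup_le
        intro r hr
        have := nraSup_tail rows r hr
        omega
      · apply nraSup_le
        intro r hr
        have := nraSup_tail rows r hr
        omega

theorem nraLoop_eq (f : Nat) (L : List (Char × List (Int × String))) (acc : List Int)
    (hnd : (L.map (fun e => e.1)).Nodup) (hne : ∀ e ∈ L, e.2 ≠ [])
    (hsup : nraSup (nraRows L) ≤ f) :
    nraLoop f (PySem.Dict.mk L) acc = acc ++ nraItl f (nraRows L) := by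
  induction f generalizing L acc with
  | zero =>
    have hL : L = [] := by
      cases L with
      | nil => rfl
      | cons e rest =>
        exfalso
        have hrow := hne e List.mem_cons_self
        have hmem : e.2.map (fun q => q.1) ∈ nraRows (e :: rest) := by simp [nraRows]
        have hlen := nraLe_sup _ _ hmem
        cases h2 : e.2 with
        | nil => exact hrow h2
        | cons a b => rw [h2] at hlen; simp at hlen; omega
    subst hL
    simp [nraLoop, nraItl]
  | succ f ih =>
    cases L with
    | nil => simp [nraLoop, nraRows, nraItl_nil]
    | cons e rest =>
      have hpass := nraPass_eq (e :: rest) acc hnd hne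
      have hnd' : ((nraPassD (e :: rest)).map (fun e => e.1)).Nodup := by
        have hsub : (nraPassD (e :: rest)).Sublist
            ((e :: rest).map (fun e => (e.1, e.2.tail))) := List.filter_sublist
        have hsub2 := hsub.map (fun e : Char × List (Int × String) => e.1)
        rw [List.map_map] at hsub2
        exact hsub2.nodup (by simpa [Function.comp_def] using hnd)
      have hne' : ∀ e' ∈ nraPassD (e :: rest), e'.2 ≠ [] := by
        intro e' he'
        have := (List.mem_filter.mp he').2
        simpa [List.isEmpty_iff] using this
      have hsup' : nraSup (nraRows (nraPassD (e :: rest))) ≤ f := by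
        rw [nraRows_passD]
        apply nraSup_le
        intro r hr
        have := nraSup_tail _ r hr
        omega
      have hstep : nraLoop (f + 1) (PySem.Dict.mk (e :: rest)) acc =
          nraLoop f (PySem.Dict.mk (nraPassD (e :: rest))) (acc ++ nraHeads (e :: rest)) := by
        simp only [nraLoop]
        rw [if_neg (by simp), hpass]
      rw [hstep, ih _ _ hnd' hne' hsup', nraHeads_eq, nraRows_passD]
      simp [nraItl]

theorem nraCol (rows : List (List Int)) (k : Nat) (out : List Int) :
    rows.foldl (fun out row =>
      match row[k]? with
      | some x => out ++ [x]
      | none => out) out = out ++ rows.filterMap (fun r => r[k]?) := by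
  induction rows generalizing out with
  | nil => simp
  | cons r rest ih =>
    cases h : r[k]? with
    | none => simp [h, ih]
    | some x => simp [h, ih]

theorem nraShift (rows : List (List Int)) (k : Nat) :
    rows.filterMap (fun r => r[k + 1]?) =
      ((rows.map List.tail).filter (fun r => !r.isEmpty)).filterMap (fun r => r[k]?) := by
  induction rows with
  | nil => rfl
  | cons r rest ih =>
    cases r with
    | nil => simpa using ih
    | cons a b =>
      by_cases hb : b.isEmpty
      · have hb' : b = [] := by simpa [List.isEmpty_iff] using hb
        subst hb'
        simp [ih]
      · simp only [List.map_cons, List.tail_cons, List.filter_cons, hb]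
        simp only [Bool.not_false, if_true, List.filterMap_cons]
        have : (a :: b)[k + 1]? = b[k]? := by simp
        rw [this, ih]

theorem nraBFold (f : Nat) (rows : List (List Int)) (acc : List Int) :
    (List.range f).foldl
      (fun out k =>
        rows.foldl
          (fun out row =>
            match row[k]? with
            | some x => out ++ [x]
            | none => out)
          out)
      acc = acc ++ nraItl f rows := by
  induction f generalizing rows acc with
  | zero => simp [nraItl]
  | succ f ih =>
    rw [List.range_succ_eq_map]
    simp only [List.foldl_cons, List.foldl_map]
    rw [nraCol]
    have hshift : ∀ (out : List Int) (k : Nat),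
        rows.foldl
          (fun out row =>
            match row[Nat.succ k]? with
            | some x => out ++ [x]
            | none => out) out =
        ((rows.map List.tail).filter (fun r => !r.isEmpty)).foldl
          (fun out row =>
            match row[k]? with
            | some x => out ++ [x]
            | none => out) out := by
      intro out k
      rw [nraCol, nraCol, Nat.succ_eq_add_one, nraShift]
    rw [PySem.List.foldl_congr_mem (List.range f)
      (fun out k =>
        rows.foldl
          (fun out row =>
            match row[Nat.succ k]? with
            | some x => out ++ [x]
            | none => out) out)
      (fun out k =>
        ((rows.map List.tail).filter (fun r => !r.isEmpty)).foldl
          (fun out row =>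
            match row[k]? with
            | some x => out ++ [x]
            | none => out) out)
      _ (fun out k _ => hshift out k)]
    rw [ih]
    have hhead : rows.filterMap (fun r => r[0]?) = rows.filterMap (fun r => r.head?) := by
      apply List.filterMap_congr
      intro r _
      exact (List.head?_eq_getElem? ).symm
    simp [nraItl, hhead]

-- ===== VERDICT (by name: the statement is the Claim_ definition above) =====
theorem non_repetitive_argsort_spec : Claim_equal_non_repetitive_argsort := by
  intro wells _hdom hpre
  unfold Spec_non_repetitive_argsort non_repetitive_argsort non_repetitive_argsort_alt
  have hw : ∀ w ∈ wells, w ≠ "" := fun w hmem hcon => hpre (hcon ▸ hmem)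
  have hkey : ∀ p ∈ PySem.List.enumerate wells, PySem.Str.pyGet? p.2 0 = some (nraHd p.2) :=
    fun p hp => nraHd_get p.2 (hw p.2 (nraEnum_mem wells 0 p hp))
  -- both grouping loops, with w[0] evaluated
  have hstepA : (PySem.List.enumerate wells).foldl
      (fun d p =>
        match PySem.Str.pyGet? p.2 0 with
        | none => d
        | some c => d.modify c [] (fun row => row ++ [p])) PySem.Dict.empty =
      (PySem.List.enumerate wells).foldl
        (fun d p => d.modify (nraHd p.2) [] (fun row => row ++ [p])) PySem.Dict.empty :=
    PySem.List.foldl_congr_mem _ _ _ _ (fun d p hp => by rw [hkey p hp])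
  have hstepB : (PySem.List.enumerate wells).foldl
      (fun g p =>
        match PySem.Str.pyGet? p.2 0 with
        | none => g
        | some c => g.modify c [] (fun row => row ++ [p.1])) PySem.Dict.empty =
      (PySem.List.enumerate wells).foldl
        (fun g p => g.modify (nraHd p.2) [] (fun row => row ++ [p.1])) PySem.Dict.empty :=
    PySem.List.foldl_congr_mem _ _ _ _ (fun g p hp => by rw [hkey p hp])
  rw [hstepA, hstepB]
  dsimp only
  set E := PySem.List.enumerate wells with hE
  set dA := E.foldl (fun d p => d.modify (nraHd p.2) [] (fun row => row ++ [p])) PySem.Dict.empty with hdA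
  set dB := E.foldl (fun g p => g.modify (nraHd p.2) [] (fun row => row ++ [p.1])) PySem.Dict.empty with hdB
  -- the rows each dict holds
  have hgetA : ∀ c, dA.getD c [] = E.filter (fun p => nraHd p.2 == c) := by
    intro c
    have h := PySem.Dict.getD_foldl_modify_append (E.map (fun p => (nraHd p.2, p)))
      PySem.Dict.empty c
    rw [List.foldl_map] at h
    simpa [hdA, List.filter_map, List.map_map, Function.comp_def, PySem.Dict.getD_empty] using h
  have hgetB : ∀ c, dB.getD c [] = (E.filter (fun p => nraHd p.2 == c)).map (fun p => p.1) := by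
    intro c
    have h := PySem.Dict.getD_foldl_modify_append (E.map (fun p => (nraHd p.2, p.1)))
      PySem.Dict.empty c
    rw [List.foldl_map] at h
    simpa [hdB, List.filter_map, List.map_map, Function.comp_def, PySem.Dict.getD_empty] using h
  -- the two dicts have the same keys
  have hkA : dA.keys = PySem.Set.ofList (E.map (fun p => nraHd p.2)) := by
    rw [hdA, PySem.Dict.keys_foldl_modify_key E (fun p => nraHd p.2) []
      (fun _ p => (fun row => row ++ [p]))]
    simp [PySem.Set.update_nil_left]
  have hkB : dB.keys = PySem.Set.ofList (E.map (fun p => nraHd p.2)) := by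
    rw [hdB, PySem.Dict.keys_foldl_modify_key E (fun p => nraHd p.2) []
      (fun _ p => (fun row => row ++ [p.1]))]
    simp [PySem.Set.update_nil_left]
  have hkeys : dB.keys = dA.keys := by rw [hkA, hkB]
  rw [hkeys]
  set ks := PySem.List.sorted dA.keys (fun r => r) with hks
  have ksnd : ks.Nodup := by
    rw [hks]
    exact (PySem.List.sorted_perm dA.keys (fun r => r) false).symm.nodup
      (by rw [hkA]; exact PySem.Set.nodup_ofList _)
  -- rows mentioned by ks are nonempty
  have hrow_ne : ∀ r ∈ ks, E.filter (fun p => nraHd p.2 == r) ≠ [] := by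
    intro r hr
    have hrk : r ∈ dA.keys := (PySem.List.sorted_perm dA.keys (fun r => r) false).mem_iff.mp hr
    rw [hkA] at hrk
    have := (PySem.Set.mem_ofList _ _).mp hrk
    obtain ⟨p, hp, hpr⟩ := List.mem_map.mp this
    have : p ∈ E.filter (fun p => nraHd p.2 == r) := List.mem_filter.mpr ⟨hp, by simp [hpr]⟩
    exact List.ne_nil_of_mem this
  -- the sorted rebuild of A's dict
  set LS := ks.map (fun r => (r, dA.getD r [])) with hLS
  have hitems := PySem.Dict.items_foldl_insert_fresh ks (fun r => r) (fun r => dA.getD r [])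
    PySem.Dict.empty (fun r _ => PySem.Dict.contains_empty r) (by simpa using ksnd)
  have hdS : ks.foldl (fun acc r => acc.insert r (dA.getD r [])) PySem.Dict.empty =
      PySem.Dict.mk LS := by
    apply PySem.Dict.ext
    simpa [hLS] using hitems
  rw [hdS]
  -- A's while loop is the column interleave of LS's index rows
  have hndLS : (LS.map (fun e => e.1)).Nodup := by simpa [hLS, List.map_map, Function.comp_def] using ksnd
  have hneLS : ∀ e ∈ LS, e.2 ≠ [] := by
    intro e he
    obtain ⟨r, hr, rfl⟩ := List.mem_map.mp he
    rw [hgetA r]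
    exact hrow_ne r hr
  have hlenrow : ∀ row ∈ nraRows LS, row.length ≤ wells.length := by
    intro row hrow
    obtain ⟨e, he, rfl⟩ := List.mem_map.mp hrow
    obtain ⟨r, hr, rfl⟩ := List.mem_map.mp he
    simp only [List.length_map, hgetA r]
    calc (E.filter (fun p => nraHd p.2 == r)).length ≤ E.length := List.length_filter_le _ _
      _ = wells.length := nraEnum_len wells 0
  have hsupLS : nraSup (nraRows LS) ≤ wells.length + 1 :=
    le_trans (nraSup_le _ _ hlenrow) (Nat.le_succ _)
  rw [nraLoop_eq (wells.length + 1) LS [] hndLS hneLS hsupLS]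
  -- B's rows are the same index rows
  have hrows : ks.map (fun r => dB.getD r []) = nraRows LS := by
    rw [hLS]
    simp only [nraRows, List.map_map, Function.comp_def]
    apply List.map_congr_left
    intro r _
    rw [hgetB r, hgetA r]
  rw [hrows]
  -- B's double loop is the column interleave as well
  have hw0 : List.foldl (fun m row => max m row.length) 0 (nraRows LS) = nraSup (nraRows LS) := rfl
  rw [hw0, nraBFold (nraSup (nraRows LS)) (nraRows LS) []]
  -- the two fuels agree
  rw [List.nil_append, List.nil_append]
  exact nraItl_stable (wells.length + 1) (nraSup (nraRows LS)) (nraRows LS) hsupLS le_rfl
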